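-- pv_equiv track=rewrite | github.com/jcraig949jfi/Prometheus | agents/hephaestus/forge_v7/causal_inference_x_multi_armed_bandits_x_property_based_testing.py | _do_calc
-- ===== SOURCE A (Python) =====
-- import re,math,zlib,collections
--
-- def _do_calc(g,iv,tgt):
--     g2=collections.defaultdict(set)
--     for a in g:
--         for b in g[a]:
--             if b!=iv: g2[a].add(b)
--     vis,q={iv},collections.deque([iv])
--     while q:
--         n=q.popleft()
--         for nb in g2.get(n,set()):
--             if nb not in vis: vis.add(nb);q.append(nb)
--     return tgt in vis
-- ===== SOURCE B (Python) =====
-- def _do_calc(g, iv, tgt):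
--     # Queue-free fixed-point iteration (naive Datalog / Bellman-Ford style):
--     # instead of copying the graph and running a BFS with a deque, grow the
--     # reachable set by whole relaxation passes over the edge list until it
--     # stabilizes; edges into iv are ignored, which removes iv's incoming edges.
--     reach = {iv}
--     changed = True
--     while changed:
--         changed = False
--         for a in g:
--             if a in reach:
--                 for b in g[a]:
--                     if b != iv and b not in reach:
--                         reach.add(b)
--                         changed = True
--     return tgt in reach
-- ===== Notes on version B (the rewrite author's own statement) =====
-- stated objective: alternative
-- what changed: B replaces A's two-phase copy-then-BFS (build a filtered defaultdict-of-sets, then traverse it with a deque) by a queue-free fixed-point computation: repeated relaxation passes over the edge list grow the reachable set until a pass adds nothing; no graph copy, no queue, no per-node expansion order.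
import Mathlib
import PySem

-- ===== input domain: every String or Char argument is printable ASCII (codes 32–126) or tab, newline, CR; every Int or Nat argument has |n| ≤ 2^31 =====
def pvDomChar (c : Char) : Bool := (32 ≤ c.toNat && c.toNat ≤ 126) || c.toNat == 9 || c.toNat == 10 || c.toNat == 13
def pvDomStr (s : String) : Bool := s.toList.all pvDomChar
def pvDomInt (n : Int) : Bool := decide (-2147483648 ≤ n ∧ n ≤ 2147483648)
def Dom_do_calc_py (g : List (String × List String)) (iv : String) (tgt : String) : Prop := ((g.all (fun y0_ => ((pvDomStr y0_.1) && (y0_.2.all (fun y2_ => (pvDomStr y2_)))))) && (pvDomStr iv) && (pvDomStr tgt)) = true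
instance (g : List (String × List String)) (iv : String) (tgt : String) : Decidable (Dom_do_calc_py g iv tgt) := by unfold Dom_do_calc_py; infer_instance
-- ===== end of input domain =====

-- B replaces A's copy-then-BFS (filtered graph copy + deque) by queue-free fixed-point
-- relaxation passes over the edge list until the reachable set stabilizes; equal return value.
-- A iterates Python sets only to build the visited set and test membership, so the result
-- does not depend on set iteration order and the ports iterate insertion order.

-- ===== PORT A =====
-- g2 = defaultdict(set); for a in g: for b in g[a]: if b != iv: g2[a].add(b)
-- (iterates the pairs of g; under Pre_ (unique keys) p.2 is exactly g[a])
def pvBuildG2 (g : List (String × List String)) (iv : String) : PySem.Dict String (PySem.Set String) :=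
  g.foldl (fun d p =>
      p.2.foldl (fun d b =>
          if b ≠ iv then d.insert p.1 (PySem.Set.add (d.getD p.1 PySem.Set.empty) b) else d) d)
    PySem.Dict.empty

-- body of 'for nb in …: if nb not in vis: vis.add(nb); q.append(nb)'
def pvStepA (st : PySem.Set String × List String) (nb : String) : PySem.Set String × List String :=
  if nb ∉ st.1 then (PySem.Set.add st.1 nb, st.2 ++ [nb]) else st

-- the while loop; one pop per step, fuel chosen large enough by the caller
def pvBfsA (g2 : PySem.Dict String (PySem.Set String)) :
    Nat → PySem.Set String × List String → PySem.Set String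
  | 0, st => st.1
  | fuel + 1, st =>
    match st.2 with
    | [] => st.1
    | n :: q => pvBfsA g2 fuel ((g2.getD n PySem.Set.empty).foldl pvStepA (st.1, q))

def do_calc_py (g : List (String × List String)) (iv : String) (tgt : String) : Bool :=
  let g2 := pvBuildG2 g iv
  -- each loop iteration pops one queued node; at most 1 + Σ|g[a]| nodes are ever queued
  let fuel := g.foldl (fun n p => n + p.2.length) 0 + 1
  let vis := pvBfsA g2 fuel (PySem.Set.ofList [iv], [iv])
  PySem.Set.contains vis tgt

-- ===== PORT B =====
-- body of 'for b in g[a]: if b != iv and b not in reach: reach.add(b); changed = True'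
def pvStepFix (iv : String) (st : PySem.Set String × Bool) (b : String) :
    PySem.Set String × Bool :=
  if b ≠ iv ∧ b ∉ st.1 then (PySem.Set.add st.1 b, true) else st

-- one full pass 'for a in g: if a in reach: for b in g[a]: …' over the state (reach, changed)
def pvPassFix (g : List (String × List String)) (iv : String)
    (st : PySem.Set String × Bool) : PySem.Set String × Bool :=
  g.foldl (fun st p => if p.1 ∈ st.1 then p.2.foldl (pvStepFix iv) st else st) st

-- 'while changed:'; each changing pass strictly grows reach, which stays inside
-- {iv} ∪ all edge targets, so Σ|g[a]| + 1 passes always suffice to reach the fixpoint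
def pvFixLoop (g : List (String × List String)) (iv : String) :
    Nat → PySem.Set String → PySem.Set String
  | 0, S => S
  | fuel + 1, S =>
    let st := pvPassFix g iv (S, false)
    if st.2 then pvFixLoop g iv fuel st.1 else st.1

def do_calc_py_alt (g : List (String × List String)) (iv : String) (tgt : String) : Bool :=
  let fuel := g.foldl (fun n p => n + p.2.length) 0 + 1
  PySem.Set.contains (pvFixLoop g iv fuel (PySem.Set.ofList [iv])) tgt

-- ===== PRECONDITION & SPEC =====
-- Pre_ excludes association lists with duplicate keys: they cannot arise from a Python
-- dict (dict keys are unique), so their reading as a dict is ambiguous.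
def Pre_do_calc_py (g : List (String × List String)) (iv : String) (tgt : String) : Prop :=
  (g.map Prod.fst).Nodup
instance (g : List (String × List String)) (iv : String) (tgt : String) : Decidable (Pre_do_calc_py g iv tgt) := by unfold Pre_do_calc_py; infer_instance

def pvWitness_do_calc_py : (List (String × List String)) × String × String :=
  ([("a", ["b", "c"]), ("b", ["a"])], "a", "c")

def Spec_do_calc_py (g : List (String × List String)) (iv : String) (tgt : String) (out : Bool) : Prop := out = do_calc_py_alt g iv tgt
instance (g : List (String × List String)) (iv : String) (tgt : String) (out : Bool) : Decidable (Spec_do_calc_py g iv tgt out) := by unfold Spec_do_calc_py; infer_instance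

-- ===== CLAIM (what is proved, stated in full; the proofs are below) =====
def Claim_equal_do_calc_py : Prop := ∀ (g : List (String × List String)) (iv : String) (tgt : String), Dom_do_calc_py g iv tgt → Pre_do_calc_py g iv tgt → Spec_do_calc_py g iv tgt (do_calc_py g iv tgt)

-- ===== LEMMAS AND PROOFS =====

-- proof-side vocabulary: dict lookup, filtered successors, edges, reachability, node pool
def pvLookup (g : List (String × List String)) (n : String) : List String :=
  (PySem.Dict.mk g).getD n []

def pvSucc (g : List (String × List String)) (iv a : String) : List String :=
  (pvLookup g a).filter (fun b => decide (b ≠ iv))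

def pvEdge (g : List (String × List String)) (iv a b : String) : Prop := b ∈ pvSucc g iv a

def pvReach (g : List (String × List String)) (iv x : String) : Prop :=
  Relation.ReflTransGen (pvEdge g iv) iv x

def pvPool (g : List (String × List String)) (iv : String) : List String :=
  iv :: g.flatMap (fun p => p.2)

theorem pv_fuel_eq_aux (g : List (String × List String)) (n : Nat) :
    g.foldl (fun n p => n + p.2.length) n = n + (g.flatMap (fun p => p.2)).length := by
  induction g generalizing n with
  | nil => simp
  | cons p g ih => simp [List.foldl_cons, ih, List.flatMap_cons]; omega

theorem pv_fuel_eq (g : List (String × List String)) (iv : String) :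
    g.foldl (fun n p => n + p.2.length) 0 + 1 = (pvPool g iv).length := by
  simp [pvPool, pv_fuel_eq_aux]

theorem pv_lookup_cons (k a : String) (vs : List String) (g : List (String × List String)) :
    pvLookup ((k, vs) :: g) a = if k == a then vs else pvLookup g a := by
  by_cases h : k == a <;>
    simp [pvLookup, PySem.Dict.getD_eq_get?_getD, PySem.Dict.get?_mk_cons, h]

theorem pv_lookup_sub (g : List (String × List String)) (a b : String)
    (h : b ∈ pvLookup g a) : b ∈ g.flatMap (fun p => p.2) := by
  induction g with
  | nil => simp [pvLookup, PySem.Dict.getD_eq_get?_getD, PySem.Dict.get?] at h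
  | cons p g ih =>
    obtain ⟨k, vs⟩ := p
    rw [pv_lookup_cons] at h
    simp only [List.flatMap_cons, List.mem_append]
    split at h
    · exact Or.inl h
    · exact Or.inr (ih h)

theorem pv_lookup_cases (g : List (String × List String)) (a : String) :
    pvLookup g a = [] ∨ ∃ vs, (a, vs) ∈ g ∧ pvLookup g a = vs := by
  induction g with
  | nil => left; simp [pvLookup, PySem.Dict.getD_eq_get?_getD, PySem.Dict.get?]
  | cons p g ih =>
    obtain ⟨k, vs⟩ := p
    rw [pv_lookup_cons]
    by_cases h : k == a
    · right
      refine ⟨vs, ?_, by simp [h]⟩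
      have : k = a := by simpa using h
      subst this
      exact List.mem_cons_self
    · rcases ih with h' | ⟨ws, hmem, h'⟩
      · left; simp [h, h']
      · right; exact ⟨ws, List.mem_cons_of_mem _ hmem, by simp [h, h']⟩

theorem pv_lookup_of_mem (g : List (String × List String))
    (hpre : (g.map Prod.fst).Nodup) (a : String) (vs : List String)
    (h : (a, vs) ∈ g) : pvLookup g a = vs := by
  induction g with
  | nil => cases h
  | cons p g ih =>
    obtain ⟨k, ws⟩ := p
    simp only [List.map_cons, List.nodup_cons] at hpre
    rw [pv_lookup_cons]
    rcases List.mem_cons.1 h with heq | hmem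
    · obtain ⟨rfl, rfl⟩ := Prod.mk.inj heq
      simp
    · have hka : k ≠ a := by
        intro rfl
        exact hpre.1 (List.mem_map.2 ⟨(k, vs), hmem, rfl⟩)
      simp only [beq_iff_eq, hka, if_false]
      exact ih hpre.2 hmem

theorem pv_succ_sub_pool (g : List (String × List String)) (iv a b : String)
    (h : b ∈ pvSucc g iv a) : b ∈ pvPool g iv := by
  exact List.mem_cons_of_mem _ (pv_lookup_sub g a b (List.mem_filter.1 h).1)

-- a set that contains iv, is closed under filtered successors, and is sound is exactly reachability
theorem pv_mem_iff_reach (g : List (String × List String)) (iv : String) (S : List String)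
    (hs : ∀ x ∈ S, pvReach g iv x) (hiv : iv ∈ S)
    (hc : ∀ n ∈ S, ∀ b ∈ pvSucc g iv n, b ∈ S) (x : String) :
    x ∈ S ↔ pvReach g iv x := by
  constructor
  · exact hs x
  · intro h
    unfold pvReach at h
    induction h with
    | refl => exact hiv
    | tail _ e ih => exact hc _ ih _ e

-- ---- A side: characterisation of the filtered graph copy (reused lemma chain) ----
theorem pv_inner_getD_ne (iv a n : String) (vs : List String)
    (d : PySem.Dict String (PySem.Set String)) (hne : n ≠ a) :
    (vs.foldl (fun d b =>
        if b ≠ iv then d.insert a (PySem.Set.add (d.getD a PySem.Set.empty) b) else d) d).getD n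
        PySem.Set.empty = d.getD n PySem.Set.empty := by
  induction vs generalizing d with
  | nil => rfl
  | cons b vs ih =>
    simp only [List.foldl_cons]
    split
    · rw [ih, PySem.Dict.getD_insert_of_ne _ _ _ hne]
    · exact ih d

theorem pv_inner_getD_self (iv a : String) (vs : List String)
    (d : PySem.Dict String (PySem.Set String)) :
    (vs.foldl (fun d b =>
        if b ≠ iv then d.insert a (PySem.Set.add (d.getD a PySem.Set.empty) b) else d) d).getD a
        PySem.Set.empty =
      vs.foldl (fun s b => if b ≠ iv then PySem.Set.add s b else s) (d.getD a PySem.Set.empty) := by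
  induction vs generalizing d with
  | nil => rfl
  | cons b vs ih =>
    simp only [List.foldl_cons]
    split
    · rw [ih, PySem.Dict.getD_insert_self]
    · exact ih d

theorem pv_build_getD_notkey (iv n : String) (g : List (String × List String))
    (d : PySem.Dict String (PySem.Set String)) (h : n ∉ g.map Prod.fst) :
    (g.foldl (fun d p =>
        p.2.foldl (fun d b =>
            if b ≠ iv then d.insert p.1 (PySem.Set.add (d.getD p.1 PySem.Set.empty) b) else d) d)
        d).getD n PySem.Set.empty = d.getD n PySem.Set.empty := by
  induction g generalizing d with
  | nil => rfl
  | cons p g ih =>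
    simp only [List.map_cons, List.mem_cons, not_or] at h
    simp only [List.foldl_cons]
    rw [ih _ h.2, pv_inner_getD_ne _ _ _ _ _ h.1]

theorem pv_build_getD_gen (iv n : String) (g : List (String × List String))
    (d : PySem.Dict String (PySem.Set String)) (hnd : (g.map Prod.fst).Nodup)
    (hd : d.getD n PySem.Set.empty = PySem.Set.empty) :
    (g.foldl (fun d p =>
        p.2.foldl (fun d b =>
            if b ≠ iv then d.insert p.1 (PySem.Set.add (d.getD p.1 PySem.Set.empty) b) else d) d)
        d).getD n PySem.Set.empty =
      PySem.Set.ofList ((pvLookup g n).filter (fun b => decide (b ≠ iv))) := by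
  induction g generalizing d with
  | nil =>
    simpa [pvLookup, PySem.Dict.getD_eq_get?_getD, PySem.Dict.get?, PySem.Set.ofList] using hd
  | cons p g ih =>
    obtain ⟨a, vs⟩ := p
    simp only [List.map_cons, List.nodup_cons] at hnd
    simp only [List.foldl_cons]
    by_cases hn : n = a
    · subst hn
      rw [pv_build_getD_notkey _ _ _ _ hnd.1, pv_inner_getD_self, hd]
      rw [PySem.List.foldl_ite_eq_foldl_filter (p := fun b => b ≠ iv) PySem.Set.add vs _]
      have hlook : pvLookup ((n, vs) :: g) n = vs := by
        simp [pvLookup, PySem.Dict.getD_eq_get?_getD, PySem.Dict.get?_mk_cons]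
      rw [hlook, PySem.Set.ofList_eq_foldl]
      rfl
    · rw [ih _ hnd.2 (by rw [pv_inner_getD_ne _ _ _ _ _ hn, hd])]
      have hbeq : (a == n) = false := by simpa using fun h => hn h.symm
      have hlook : pvLookup ((a, vs) :: g) n = pvLookup g n := by
        simp [pvLookup, PySem.Dict.getD_eq_get?_getD, PySem.Dict.get?_mk_cons, hbeq]
      rw [hlook]

theorem pv_build_getD (iv n : String) (g : List (String × List String))
    (hnd : (g.map Prod.fst).Nodup) :
    (pvBuildG2 g iv).getD n PySem.Set.empty = PySem.Set.ofList (pvSucc g iv n) := by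
  have h := pv_build_getD_gen iv n g PySem.Dict.empty hnd (PySem.Dict.getD_empty _ _)
  simpa [pvBuildG2, pvSucc] using h

-- ---- A side: BFS ----
-- one expansion appends the same fresh elements to visited and to the queue
theorem pv_foldA_shape (l : List String) (vis q : List String) (hnd : vis.Nodup) :
    ∃ new : List String, l.foldl pvStepA (vis, q) = (vis ++ new, q ++ new) ∧
      (∀ b ∈ new, b ∈ l) ∧ (∀ b ∈ l, b ∈ vis ++ new) ∧ (vis ++ new).Nodup := by
  induction l generalizing vis q with
  | nil => exact ⟨[], by simp, by simp, by simp, by simpa using hnd⟩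
  | cons b l ih =>
    by_cases hb : b ∈ vis
    · have hstep : pvStepA (vis, q) b = (vis, q) := by simp [pvStepA, hb]
      obtain ⟨new, h1, h2, h3, h4⟩ := ih vis q hnd
      refine ⟨new, by simpa [List.foldl_cons, hstep] using h1,
        fun c hc => List.mem_cons_of_mem _ (h2 c hc), ?_, h4⟩
      intro c hc
      rcases List.mem_cons.1 hc with rfl | hc
      · exact List.mem_append.2 (Or.inl hb)
      · exact h3 c hc
    · have hstep : pvStepA (vis, q) b = (vis ++ [b], q ++ [b]) := by
        simp [pvStepA, hb]
      have hnd' : (vis ++ [b]).Nodup := by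
        rw [List.nodup_append]
        refine ⟨hnd, List.nodup_singleton b, ?_⟩
        intro a ha c hc hac
        exact hb ((hac.trans (List.eq_of_mem_singleton hc)) ▸ ha)
      obtain ⟨new, h1, h2, h3, h4⟩ := ih (vis ++ [b]) (q ++ [b]) hnd'
      refine ⟨b :: new, ?_, ?_, ?_, by simpa [List.append_assoc] using h4⟩
      · simpa [List.foldl_cons, hstep, List.append_assoc] using h1
      · intro c hc
        rcases List.mem_cons.1 hc with rfl | hc
        · exact List.mem_cons_self
        · exact List.mem_cons_of_mem _ (h2 c hc)
      · intro c hc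
        rcases List.mem_cons.1 hc with rfl | hc
        · simp
        · have := h3 c hc
          simpa [List.append_assoc] using this

theorem pvBfsA_spec (g : List (String × List String)) (iv : String)
    (hpre : (g.map Prod.fst).Nodup) (fuel : Nat) (vis q : List String)
    (hnd : vis.Nodup) (hq : ∀ x ∈ q, x ∈ vis)
    (hsub : ∀ x ∈ vis, x ∈ pvPool g iv)
    (hr : ∀ x ∈ vis, pvReach g iv x)
    (hexp : ∀ n ∈ vis, n ∉ q → ∀ b ∈ pvSucc g iv n, b ∈ vis)
    (hfuel : q.length + (pvPool g iv).length ≤ fuel + vis.length) :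
    (∀ x ∈ vis, x ∈ pvBfsA (pvBuildG2 g iv) fuel (vis, q)) ∧
    (∀ x ∈ pvBfsA (pvBuildG2 g iv) fuel (vis, q), pvReach g iv x) ∧
    (∀ n ∈ pvBfsA (pvBuildG2 g iv) fuel (vis, q), ∀ b ∈ pvSucc g iv n,
      b ∈ pvBfsA (pvBuildG2 g iv) fuel (vis, q)) := by
  induction fuel generalizing vis q with
  | zero =>
    have hlen : vis.length ≤ (pvPool g iv).length :=
      (List.subperm_of_subset hnd hsub).length_le
    have hq0 : q = [] := by
      have : q.length = 0 := by omega
      exact List.eq_nil_of_length_eq_zero this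
    subst hq0
    exact ⟨fun x hx => hx, hr, fun n hn => hexp n hn (by simp)⟩
  | succ fuel ih =>
    match q, hq, hexp, hfuel with
    | [], hq, hexp, hfuel =>
      exact ⟨fun x hx => hx, hr, fun n hn => hexp n hn (by simp)⟩
    | n :: q₁, hq, hexp, hfuel =>
      have hstep : pvBfsA (pvBuildG2 g iv) (fuel + 1) (vis, n :: q₁) =
          pvBfsA (pvBuildG2 g iv) fuel
            (((pvBuildG2 g iv).getD n PySem.Set.empty).foldl pvStepA (vis, q₁)) := rfl
      obtain ⟨new, h1, h2, h3, h4⟩ :=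
        pv_foldA_shape (PySem.Set.ofList (pvSucc g iv n)) vis q₁ hnd
      rw [hstep, pv_build_getD iv n g hpre, h1]
      have hnmem : n ∈ vis := hq n List.mem_cons_self
      have hnew_succ : ∀ b ∈ new, b ∈ pvSucc g iv n := fun b hb =>
        (PySem.Set.mem_ofList _ _).1 (h2 b hb)
      have hq' : ∀ x ∈ q₁ ++ new, x ∈ vis ++ new := by
        intro x hx
        rcases List.mem_append.1 hx with hx | hx
        · exact List.mem_append.2 (Or.inl (hq x (List.mem_cons_of_mem _ hx)))
        · exact List.mem_append.2 (Or.inr hx)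
      have hsub' : ∀ x ∈ vis ++ new, x ∈ pvPool g iv := by
        intro x hx
        rcases List.mem_append.1 hx with hx | hx
        · exact hsub x hx
        · exact pv_succ_sub_pool g iv n x (hnew_succ x hx)
      have hr' : ∀ x ∈ vis ++ new, pvReach g iv x := by
        intro x hx
        rcases List.mem_append.1 hx with hx | hx
        · exact hr x hx
        · exact Relation.ReflTransGen.tail (hr n hnmem) (hnew_succ x hx)
      have hexp' : ∀ m ∈ vis ++ new, m ∉ q₁ ++ new → ∀ b ∈ pvSucc g iv m, b ∈ vis ++ new := by
        intro m hm hmq b hb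
        rcases List.mem_append.1 hm with hm | hm
        · by_cases hmn : m = n
          · subst hmn
            exact h3 b ((PySem.Set.mem_ofList _ _).2 hb)
          · have hmq1 : m ∉ n :: q₁ := by
              intro hc
              rcases List.mem_cons.1 hc with rfl | hc
              · exact hmn rfl
              · exact hmq (List.mem_append.2 (Or.inl hc))
            exact List.mem_append.2 (Or.inl (hexp m hm hmq1 b hb))
        · exact absurd (List.mem_append.2 (Or.inr hm)) hmq
      have hfuel' : (q₁ ++ new).length + (pvPool g iv).length ≤ fuel + (vis ++ new).length := by
        simp only [List.length_append]
        simp only [List.length_cons] at hfuel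
        omega
      obtain ⟨ha, hb', hc⟩ := ih (vis ++ new) (q₁ ++ new) h4 hq' hsub' hr' hexp' hfuel'
      exact ⟨fun x hx => ha x (List.mem_append.2 (Or.inl hx)), hb', hc⟩

-- ---- B side: relaxation passes ----
-- one inner relaxation appends fresh non-iv elements; flag records whether any were added
theorem pv_foldFix_spec (iv : String) (l : List String) (vis : List String) (ch : Bool)
    (hnd : vis.Nodup) :
    ∃ new : List String, l.foldl (pvStepFix iv) (vis, ch) = (vis ++ new, ch || !new.isEmpty) ∧
      (vis ++ new).Nodup ∧ (∀ x ∈ new, x ∈ l ∧ x ≠ iv) ∧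
      (∀ b ∈ l, b = iv ∨ b ∈ vis ++ new) := by
  induction l generalizing vis ch with
  | nil => exact ⟨[], by simp, by simpa using hnd, by simp, by simp⟩
  | cons b l ih =>
    by_cases hg : b ≠ iv ∧ b ∉ vis
    · have hstep : pvStepFix iv (vis, ch) b = (vis ++ [b], true) := by
        unfold pvStepFix
        rw [if_pos hg, PySem.Set.add_of_not_mem hg.2]
      have hnd' : (vis ++ [b]).Nodup := by
        rw [List.nodup_append]
        refine ⟨hnd, List.nodup_singleton b, ?_⟩
        intro a ha c hc hac
        exact hg.2 ((hac.trans (List.eq_of_mem_singleton hc)) ▸ ha)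
      obtain ⟨new, h1, h2, h3, h4⟩ := ih (vis ++ [b]) true hnd'
      refine ⟨b :: new, ?_, by simpa [List.append_assoc] using h2, ?_, ?_⟩
      · have : (b :: l).foldl (pvStepFix iv) (vis, ch) = l.foldl (pvStepFix iv) (vis ++ [b], true) := by
          rw [List.foldl_cons, hstep]
        rw [this, h1]
        simp [List.append_assoc]
      · intro x hx
        rcases List.mem_cons.1 hx with rfl | hx
        · exact ⟨List.mem_cons_self, hg.1⟩
        · exact ⟨List.mem_cons_of_mem _ (h3 x hx).1, (h3 x hx).2⟩
      · intro c hc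
        rcases List.mem_cons.1 hc with rfl | hc
        · right; simp
        · rcases h4 c hc with h | h
          · exact Or.inl h
          · right; simpa [List.append_assoc] using h
    · have hstep : pvStepFix iv (vis, ch) b = (vis, ch) := by
        simp only [pvStepFix, hg, if_neg, not_false_eq_true]
      obtain ⟨new, h1, h2, h3, h4⟩ := ih vis ch hnd
      refine ⟨new, by rw [List.foldl_cons, hstep]; exact h1, h2,
        fun x hx => ⟨List.mem_cons_of_mem _ (h3 x hx).1, (h3 x hx).2⟩, ?_⟩
      intro c hc
      rcases List.mem_cons.1 hc with rfl | hc
      · rcases not_and_or.1 hg with h | h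
        · exact Or.inl (not_not.1 h)
        · exact Or.inr (List.mem_append.2 (Or.inl (not_not.1 h)))
      · exact h4 c hc

theorem pv_passFix_spec (g : List (String × List String)) (iv : String)
    (S : List String) (ch : Bool) (hnd : S.Nodup) :
    ∃ new : List String, pvPassFix g iv (S, ch) = (S ++ new, ch || !new.isEmpty) ∧
      (S ++ new).Nodup ∧ (∀ x ∈ new, x ∈ g.flatMap (fun p => p.2)) ∧
      (new = [] → ∀ p ∈ g, p.1 ∈ S → ∀ b ∈ p.2, b = iv ∨ b ∈ S) := by
  induction g generalizing S ch with
  | nil => exact ⟨[], by simp [pvPassFix], by simpa using hnd, by simp, by simp⟩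
  | cons p g ih =>
    have hunf : pvPassFix (p :: g) iv (S, ch) =
        pvPassFix g iv (if p.1 ∈ S then p.2.foldl (pvStepFix iv) (S, ch) else (S, ch)) := rfl
    by_cases hp : p.1 ∈ S
    · obtain ⟨new₁, h1, h2, h3, h4⟩ := pv_foldFix_spec iv p.2 S ch hnd
      obtain ⟨new₂, g1, g2', g3, g4⟩ := ih (S ++ new₁) (ch || !new₁.isEmpty) h2
      refine ⟨new₁ ++ new₂, ?_, by simpa [List.append_assoc] using g2', ?_, ?_⟩
      · rw [hunf, if_pos hp, h1, g1, Prod.mk.injEq]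
        constructor
        · simp [List.append_assoc]
        · cases new₁ <;> cases new₂ <;> simp
      · intro x hx
        simp only [List.flatMap_cons, List.mem_append]
        rcases List.mem_append.1 hx with hx | hx
        · exact Or.inl (h3 x hx).1
        · exact Or.inr (g3 x hx)
      · intro hnil q hq hq1 b hb
        rcases List.append_eq_nil_iff.1 hnil with ⟨rfl, rfl⟩
        rcases List.mem_cons.1 hq with rfl | hq
        · rcases h4 b hb with h | h
          · exact Or.inl h
          · exact Or.inr (by simpa using h)
        · have := g4 rfl q hq (by simpa using hq1) b hb
          simpa using this
    · obtain ⟨new, h1, h2, h3, h4⟩ := ih S ch hnd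
      refine ⟨new, by rw [hunf, if_neg hp]; exact h1, h2, ?_, ?_⟩
      · intro x hx
        simp only [List.flatMap_cons, List.mem_append]
        exact Or.inr (h3 x hx)
      · intro hnil q hq hq1 b hb
        rcases List.mem_cons.1 hq with rfl | hq
        · exact absurd hq1 hp
        · exact h4 hnil q hq hq1 b hb

theorem pv_foldFix_sound (g : List (String × List String)) (iv : String) (l : List String)
    (st : PySem.Set String × Bool)
    (hl : ∀ b ∈ l, b ≠ iv → pvReach g iv b) (hr : ∀ x ∈ st.1, pvReach g iv x) :
    ∀ x ∈ (l.foldl (pvStepFix iv) st).1, pvReach g iv x := by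
  induction l generalizing st with
  | nil => exact hr
  | cons b l ih =>
    rw [List.foldl_cons]
    refine ih _ (fun c hc hc2 => hl c (List.mem_cons_of_mem _ hc) hc2) ?_
    intro x hx
    unfold pvStepFix at hx
    split at hx
    · rename_i hg
      rcases (PySem.Set.mem_add _ _ _).1 hx with hx | rfl
      · exact hr x hx
      · exact hl x List.mem_cons_self hg.1
    · exact hr x hx

theorem pv_passFix_sound (g : List (String × List String)) (iv : String)
    (hpre : (g.map Prod.fst).Nodup) (gg : List (String × List String))
    (hgg : ∀ p ∈ gg, p ∈ g) (st : PySem.Set String × Bool)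
    (hr : ∀ x ∈ st.1, pvReach g iv x) :
    ∀ x ∈ (gg.foldl (fun st p => if p.1 ∈ st.1 then p.2.foldl (pvStepFix iv) st else st) st).1,
      pvReach g iv x := by
  induction gg generalizing st with
  | nil => exact hr
  | cons p gg ih =>
    rw [List.foldl_cons]
    refine ih (fun q hq => hgg q (List.mem_cons_of_mem _ hq)) _ ?_
    by_cases hp : p.1 ∈ st.1
    · rw [if_pos hp]
      refine pv_foldFix_sound g iv p.2 st ?_ hr
      intro b hb hbiv
      have hlk : pvLookup g p.1 = p.2 := by
        have hmem : (p.1, p.2) ∈ g := hgg p List.mem_cons_self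
        exact pv_lookup_of_mem g hpre p.1 p.2 hmem
      have hedge : pvEdge g iv p.1 b := by
        unfold pvEdge pvSucc
        rw [hlk]
        exact List.mem_filter.2 ⟨hb, by simpa using hbiv⟩
      exact Relation.ReflTransGen.tail (hr p.1 hp) hedge
    · rw [if_neg hp]; exact hr

theorem pvFixLoop_spec (g : List (String × List String)) (iv : String)
    (hpre : (g.map Prod.fst).Nodup) (fuel : Nat) (S : List String)
    (hnd : S.Nodup) (hiv : iv ∈ S) (hsub : ∀ x ∈ S, x ∈ pvPool g iv)
    (hr : ∀ x ∈ S, pvReach g iv x)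
    (hfuel : (pvPool g iv).length ≤ fuel + S.length) :
    (∀ x ∈ pvFixLoop g iv fuel S, pvReach g iv x) ∧ iv ∈ pvFixLoop g iv fuel S ∧
    (∀ n ∈ pvFixLoop g iv fuel S, ∀ b ∈ pvSucc g iv n, b ∈ pvFixLoop g iv fuel S) := by
  induction fuel generalizing S with
  | zero =>
    have hsp := List.subperm_of_subset hnd hsub
    have hperm : S.Perm (pvPool g iv) := hsp.perm_of_length_le (by simpa using hfuel)
    have hpool : ∀ x ∈ pvPool g iv, x ∈ S := fun x hx => hperm.symm.subset hx
    exact ⟨hr, hiv, fun n _ b hb => hpool b (pv_succ_sub_pool g iv n b hb)⟩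
  | succ fuel ih =>
    obtain ⟨new, h1, h2, h3, h4⟩ := pv_passFix_spec g iv S false hnd
    have hsound := pv_passFix_sound g iv hpre g (fun p hp => hp) (S, false) hr
    have hunf : pvFixLoop g iv (fuel + 1) S =
        (if (pvPassFix g iv (S, false)).2 then pvFixLoop g iv fuel (pvPassFix g iv (S, false)).1
         else (pvPassFix g iv (S, false)).1) := rfl
    cases hne : new with
    | nil =>
      subst hne
      rw [hunf, h1]
      simp only [List.append_nil, List.isEmpty_nil, Bool.not_true, Bool.or_false, if_false,
        Bool.false_eq_true]
      refine ⟨hr, hiv, ?_⟩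
      intro n hn b hb
      have hbiv : b ≠ iv := by simpa using (List.mem_filter.1 hb).2
      have hbl : b ∈ pvLookup g n := (List.mem_filter.1 hb).1
      rcases pv_lookup_cases g n with hc | ⟨vs, hmem, hc⟩
      · rw [hc] at hbl; cases hbl
      · rcases h4 rfl (n, vs) hmem hn b (hc ▸ hbl) with h | h
        · exact absurd h hbiv
        · exact h
    | cons x new' =>
      subst hne
      rw [hunf, h1]
      simp only [List.isEmpty_cons, Bool.not_false, Bool.or_true, if_true]
      have hsub' : ∀ y ∈ S ++ x :: new', y ∈ pvPool g iv := by
        intro y hy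
        rcases List.mem_append.1 hy with hy | hy
        · exact hsub y hy
        · exact List.mem_cons_of_mem _ (h3 y hy)
      have hr' : ∀ y ∈ S ++ x :: new', pvReach g iv y := by
        have hs := hsound
        rw [show (g.foldl (fun st p => if p.1 ∈ st.1 then p.2.foldl (pvStepFix iv) st else st)
          (S, false)) = pvPassFix g iv (S, false) from rfl, h1] at hs
        exact hs
      have hfuel' : (pvPool g iv).length ≤ fuel + (S ++ x :: new').length := by
        simp only [List.length_append, List.length_cons]
        omega
      exact ih (S ++ x :: new') h2 (List.mem_append.2 (Or.inl hiv)) hsub' hr' hfuel' 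

-- ===== VERDICT (by name: the statement is the Claim_ definition above) =====
theorem do_calc_py_spec : Claim_equal_do_calc_py := by
  intro g iv tgt _ hpre
  unfold Spec_do_calc_py do_calc_py do_calc_py_alt
  have hof : PySem.Set.ofList [iv] = [iv] :=
    PySem.Set.ofList_eq_self_of_nodup _ (List.nodup_singleton iv)
  show PySem.Set.contains
      (pvBfsA (pvBuildG2 g iv) (g.foldl (fun n p => n + p.2.length) 0 + 1)
        (PySem.Set.ofList [iv], [iv])) tgt =
    PySem.Set.contains
      (pvFixLoop g iv (g.foldl (fun n p => n + p.2.length) 0 + 1) (PySem.Set.ofList [iv])) tgt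
  rw [hof, pv_fuel_eq g iv]
  have hr0 : ∀ x ∈ [iv], pvReach g iv x := by
    intro x hx
    rw [List.eq_of_mem_singleton hx]
    exact Relation.ReflTransGen.refl
  obtain ⟨hAsup, hAsound, hAclosed⟩ :=
    pvBfsA_spec g iv hpre ((pvPool g iv).length) [iv] [iv]
      (List.nodup_singleton iv) (fun x hx => hx)
      (fun x hx => (List.eq_of_mem_singleton hx) ▸ List.mem_cons_self)
      hr0
      (fun n hn hnq => absurd hn hnq)
      (by simp; omega)
  obtain ⟨hBsound, hBiv, hBclosed⟩ :=
    pvFixLoop_spec g iv hpre ((pvPool g iv).length) [iv]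
      (List.nodup_singleton iv) List.mem_cons_self
      (fun x hx => (List.eq_of_mem_singleton hx) ▸ List.mem_cons_self)
      hr0
      (by simp)
  have hAiv : iv ∈ pvBfsA (pvBuildG2 g iv) ((pvPool g iv).length) ([iv], [iv]) :=
    hAsup iv List.mem_cons_self
  have hA := pv_mem_iff_reach g iv _ hAsound hAiv hAclosed tgt
  have hB := pv_mem_iff_reach g iv _ hBsound hBiv hBclosed tgt
  rw [Bool.eq_iff_iff, PySem.Set.contains_iff, PySem.Set.contains_iff]
  exact hA.trans hB.symm
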